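-- pv_equiv track=rewrite | github.com/colalillo/python_projects | Py_DS_IQs.py | chapped_sort
-- ===== SOURCE A (Python) =====
-- def chapped_sort(arr, n):
--     fin = []
--     arr_s = sorted(arr)
--
--     i = 0
--     j = n-1
--
--     while i < j:
--
--         fin.append(j)
--         j -= 1
--
--         fin.append(i)
--         i += 1
--
--     if n % 2 != 0:
--         s = n / 2
--         s = int(s - 0.5)
--         fin.append(s)
--
--     return fin
-- ===== SOURCE B (Python) =====
-- def chapped_sort(arr, n):
--     # Closed-form: output position k holds n-1-k//2 at even k (descending from n-1)
--     # and k//2 at odd k (ascending from 0).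
--     return [n - 1 - k // 2 if k % 2 == 0 else k // 2 for k in range(n)]
-- ===== Notes on version B (the rewrite author's own statement) =====
-- stated objective: simpler
-- what changed: Replaces the converging two-pointer while-loop plus the separate odd-length middle branch with a single closed-form index formula mapped over range(n).
-- intended difference: For negative odd n, A's `n % 2 != 0` branch still fires and it returns the one-element list [n//2] (e.g. [-1] for n=-1), while B returns the empty list, the intended result for a non-positive length. — e.g. on chapped_sort([], -1): A returns [-1], B returns []
import Mathlib
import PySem

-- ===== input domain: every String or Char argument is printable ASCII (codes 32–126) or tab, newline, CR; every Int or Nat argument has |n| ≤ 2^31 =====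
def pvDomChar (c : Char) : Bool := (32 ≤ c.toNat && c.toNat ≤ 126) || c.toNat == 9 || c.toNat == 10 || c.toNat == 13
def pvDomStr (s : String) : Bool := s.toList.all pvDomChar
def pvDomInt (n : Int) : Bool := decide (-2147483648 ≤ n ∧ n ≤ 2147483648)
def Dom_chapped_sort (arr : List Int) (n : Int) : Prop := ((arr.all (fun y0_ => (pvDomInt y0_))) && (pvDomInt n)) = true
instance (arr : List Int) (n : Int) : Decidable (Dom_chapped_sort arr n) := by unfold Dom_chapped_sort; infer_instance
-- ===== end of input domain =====

-- B replaces A's converging two-pointer while-loop (and its odd-length middle branch)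
-- with one closed-form index formula mapped over range(n): simpler, same cost.
-- For negative odd n A returns [n//2] (leftover middle branch); B returns [], the intended
-- result for a non-positive length (stated as D_chapped_sort below).


-- ===== PORT A =====
-- the while-loop of A: `while i < j: fin.append(j); j -= 1; fin.append(i); i += 1`;
-- the fuel (j - i).toNat at entry only makes the recursion structural, it never cuts the loop short
def chappedLoop (fuel : Nat) (i j : Int) (fin : List Int) : List Int :=
  match fuel with
  | 0 => fin
  | fuel + 1 => if i < j then chappedLoop fuel (i + 1) (j - 1) (fin ++ [j, i]) else fin

def chapped_sort (arr : List Int) (n : Int) : List Int :=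
  let _arr_s := PySem.List.sorted arr (fun x => x) false   -- arr_s = sorted(arr), unused
  let fin := chappedLoop (n - 1 - 0).toNat 0 (n - 1) []
  if PySem.Int.mod n 2 ≠ 0 then
    -- s = int(n/2 - 0.5): for odd n with |n| ≤ 2^31 the float arithmetic is exact
    -- and the result is exactly the integer (n-1)//2
    fin ++ [PySem.Int.floordiv (n - 1) 2]
  else fin

-- ===== PORT B =====
def chapped_sort_alt (arr : List Int) (n : Int) : List Int :=
  (PySem.List.pyRange 0 n 1).map (fun k =>
    if PySem.Int.mod k 2 = 0 then n - 1 - PySem.Int.floordiv k 2 else PySem.Int.floordiv k 2)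

-- ===== PRECONDITION & SPEC =====
-- For negative odd n, A's `n % 2 != 0` branch still fires and it returns the one-element list
-- [n//2] (e.g. [-1] for n = -1), while B returns [], the intended result for a non-positive length.
def D_chapped_sort (arr : List Int) (n : Int) : Prop := n < 0 ∧ PySem.Int.mod n 2 ≠ 0
instance (arr : List Int) (n : Int) : Decidable (D_chapped_sort arr n) := by unfold D_chapped_sort; infer_instance

def Spec_chapped_sort (arr : List Int) (n : Int) (out : List Int) : Prop :=
  ¬ D_chapped_sort arr n → out = chapped_sort_alt arr n
instance (arr : List Int) (n : Int) (out : List Int) : Decidable (Spec_chapped_sort arr n out) := by unfold Spec_chapped_sort; infer_instance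

def pvDiffWitness_chapped_sort : List Int × Int := ([], -1)
def pvDiffWitnessOut_chapped_sort : (List Int) × (List Int) := ([-1], [])

-- ===== CLAIM (what is proved, stated in full; the proofs are below) =====
def Claim_unchanged_chapped_sort : Prop := ∀ (arr : List Int) (n : Int), Dom_chapped_sort arr n → Spec_chapped_sort arr n (chapped_sort arr n)
def Claim_changed_chapped_sort : Prop := Dom_chapped_sort (pvDiffWitness_chapped_sort.1) (pvDiffWitness_chapped_sort.2) ∧ D_chapped_sort (pvDiffWitness_chapped_sort.1) (pvDiffWitness_chapped_sort.2) ∧ chapped_sort (pvDiffWitness_chapped_sort.1) (pvDiffWitness_chapped_sort.2) = pvDiffWitnessOut_chapped_sort.1 ∧ chapped_sort_alt (pvDiffWitness_chapped_sort.1) (pvDiffWitness_chapped_sort.2) = pvDiffWitnessOut_chapped_sort.2 ∧ pvDiffWitnessOut_chapped_sort.1 ≠ pvDiffWitnessOut_chapped_sort.2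
def Claim_exact_chapped_sort : Prop := ∀ (arr : List Int) (n : Int), Dom_chapped_sort arr n → D_chapped_sort arr n → chapped_sort arr n ≠ chapped_sort_alt arr n

-- ===== LEMMAS AND PROOFS =====

-- floor-division/mod facts for divisor 2, in a form omega can consume
theorem pvFm2 (a : Int) : PySem.Int.floordiv a 2 * 2 + PySem.Int.mod a 2 = a ∧
    0 ≤ PySem.Int.mod a 2 ∧ PySem.Int.mod a 2 < 2 :=
  ⟨PySem.Int.floordiv_mul_add_mod a 2,
   PySem.Int.mod_nonneg a (by norm_num),
   PySem.Int.mod_lt a (by norm_num)⟩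

-- the loop, characterised: from state (i, n-1-i) it emits exactly the formula values
-- for k = 2i .. 2*(n//2) - 1
theorem chappedLoop_eq (n : Int) (fuel : Nat) : ∀ (i j : Int) (fin : List Int),
    (j - i).toNat ≤ fuel → 0 ≤ i → i + j = n - 1 →
    chappedLoop fuel i j fin = fin ++ (PySem.List.pyRange (2 * i) (2 * PySem.Int.floordiv n 2) 1).map
      (fun k => if PySem.Int.mod k 2 = 0 then n - 1 - PySem.Int.floordiv k 2 else PySem.Int.floordiv k 2) := by
  induction fuel with
  | zero =>
    intro i j fin hd hi hij
    obtain ⟨hn1, hn2, hn3⟩ := pvFm2 n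
    rw [chappedLoop, PySem.List.pyRange_one_eq_nil (by omega)]
    simp
  | succ fuel ih =>
    intro i j fin hd hi hij
    obtain ⟨hn1, hn2, hn3⟩ := pvFm2 n
    rw [chappedLoop]
    by_cases h : i < j
    · rw [if_pos h, ih (i + 1) (j - 1) _ (by omega) (by omega) (by omega)]
      obtain ⟨he1, he2, he3⟩ := pvFm2 (2 * i)
      obtain ⟨ho1, ho2, ho3⟩ := pvFm2 (2 * i + 1)
      have hb : 2 * i + 1 < 2 * PySem.Int.floordiv n 2 := by omega
      have hfe : PySem.Int.floordiv (2 * i) 2 = i := by omega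
      have hfo : PySem.Int.floordiv (2 * i + 1) 2 = i := by omega
      have hme : PySem.Int.mod (2 * i) 2 = 0 := by omega
      have hmo : PySem.Int.mod (2 * i + 1) 2 = 1 := by omega
      have hc1 : PySem.List.pyRange (2 * i) (2 * PySem.Int.floordiv n 2) 1 =
          (2 * i) :: PySem.List.pyRange (2 * i + 1) (2 * PySem.Int.floordiv n 2) 1 :=
        PySem.List.pyRange_one_cons (by omega)
      have hc2 : PySem.List.pyRange (2 * i + 1) (2 * PySem.Int.floordiv n 2) 1 =
          (2 * i + 1) :: PySem.List.pyRange (2 * i + 1 + 1) (2 * PySem.Int.floordiv n 2) 1 :=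
        PySem.List.pyRange_one_cons (by omega)
      have h2 : (2 * i + 1 + 1 : Int) = 2 * (i + 1) := by ring
      have hj : j = n - 1 - i := by omega
      rw [hc1, hc2, h2]
      simp only [List.map_cons]
      rw [hme, hfe, hmo, hfo, hj]
      simp only [List.append_assoc, List.cons_append, List.nil_append]
      norm_num
    · rw [if_neg h, PySem.List.pyRange_one_eq_nil (by omega)]
      simp

theorem chapped_sort_eq (arr : List Int) (n : Int) (h : ¬ D_chapped_sort arr n) :
    chapped_sort arr n = chapped_sort_alt arr n := by
  obtain ⟨hn1, hn2, hn3⟩ := pvFm2 n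
  simp only [chapped_sort, chapped_sort_alt]
  rw [chappedLoop_eq n (n - 1 - 0).toNat 0 (n - 1) [] (by omega) le_rfl (by ring)]
  simp only [List.nil_append, mul_zero]
  by_cases hm : PySem.Int.mod n 2 = 0
  · have hM : 2 * PySem.Int.floordiv n 2 = n := by omega
    rw [hM]
    split_ifs with hc
    · exact absurd hm hc
    · rfl
  · have hpos : 0 ≤ n := by
      unfold D_chapped_sort at h
      by_contra hneg
      exact h ⟨by omega, hm⟩
    have hM : 2 * PySem.Int.floordiv n 2 = n - 1 := by omega
    obtain ⟨hp1, hp2, hp3⟩ := pvFm2 (n - 1)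
    have hmd : PySem.Int.mod (n - 1) 2 = 0 := by omega
    have hfd : n - 1 - PySem.Int.floordiv (n - 1) 2 = PySem.Int.floordiv (n - 1) 2 := by omega
    have hsp : PySem.List.pyRange 0 n 1 = PySem.List.pyRange 0 (n - 1) 1 ++ [n - 1] := by
      have := PySem.List.pyRange_one_succ_right (a := 0) (b := n - 1) (by omega)
      simpa using this
    rw [hM, hsp, List.map_append]
    split_ifs with hc
    · simp only [List.map_cons, List.map_nil]
      rw [hmd, hfd]
      norm_num
    · exact absurd hm hc

-- ===== VERDICT (by name: the statement is the Claim_ definition above) =====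
theorem chapped_sort_spec : Claim_unchanged_chapped_sort := by
  intro arr n _ hD
  exact chapped_sort_eq arr n hD

theorem chapped_sort_changed : Claim_changed_chapped_sort := by
  unfold Claim_changed_chapped_sort; decide

theorem chapped_sort_tight : Claim_exact_chapped_sort := by
  intro arr n _ hD
  obtain ⟨hneg, hodd⟩ := hD
  simp only [chapped_sort, chapped_sort_alt]
  rw [PySem.List.pyRange_one_eq_nil (by omega)]
  have hf : (n - 1 - 0).toNat = 0 := by omega
  rw [hf]
  have h1 : n % 2 = 1 := by
    obtain ⟨m1, m2, m3⟩ := pvFm2 n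
    have h2 := PySem.Int.mod_eq_emod_of_pos (a := n) (b := 2) (by norm_num)
    omega
  simp [chappedLoop, h1]
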